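-- pv_equiv track=rewrite | github.com/seryxme/allPythonWorks | classwork/online_tasks/longest_concatenation.py | longest_concat
-- ===== SOURCE A (Python) =====
-- def longest_concat(s, k):
--     concat = []
--     temp = []
--
--     count = 0
--     i = 0
--
--     while count < len(s) - (k - 1):
--         if len(temp) < k:
--             temp.append(s[i + count])
--             i += 1
--         else:
--             s1 = "".join(temp)
--             concat.append(s1)
--             temp = []
--             count += 1
--             i = 0
--
--     concat.sort(key=len, reverse=True)
--     longest_str = concat[0]
--     longest = len(concat[0])
--     for a in range(len(concat)):
--         if len(concat[a]) > longest:
--             longest_str = concat[a]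
--
--     return longest_str
-- ===== SOURCE B (Python) =====
-- def longest_concat(s, k):
--     # Every k-character window of s has length exactly k, so the stable
--     # length-sort keeps the first window in front and no window can beat it:
--     # the answer is simply the first window, s[:k] (empty for k <= 0).
--     if k <= 0:
--         return ""
--     return s[:k]
-- ===== Notes on version B (the rewrite author's own statement) =====
-- stated objective: faster
-- what changed: B replaces A's char-by-char window building, length-sort and rescan by the closed form s[:k] (empty for k<=0), justified because all k-windows have equal length so the stable sort leaves the first window in front.
import Mathlib
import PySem

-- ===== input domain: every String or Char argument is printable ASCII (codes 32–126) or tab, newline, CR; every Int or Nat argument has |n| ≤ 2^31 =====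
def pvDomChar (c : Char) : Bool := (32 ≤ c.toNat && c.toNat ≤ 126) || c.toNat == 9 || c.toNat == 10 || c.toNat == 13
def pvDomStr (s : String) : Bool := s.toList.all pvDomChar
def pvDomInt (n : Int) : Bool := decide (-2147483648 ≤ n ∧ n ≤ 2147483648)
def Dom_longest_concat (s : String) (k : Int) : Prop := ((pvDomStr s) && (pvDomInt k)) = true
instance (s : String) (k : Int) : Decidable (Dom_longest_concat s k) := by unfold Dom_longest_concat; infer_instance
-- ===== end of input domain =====

-- B replaces A's window building + length-sort + rescan by the closed form s[:k] ("" for k ≤ 0).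
-- ===== PORT A =====
-- the while-loop of A: state (count, i, temp, concat); 'none' from pyGet? is A's IndexError path (outside Pre_).
-- concat (Python append-to-list) is accumulated in reverse and reversed once where the loop's value is used.
def lcLoop (cs : List Char) (k limit : Int) (count i : Int) (temp : List Char)
    (concat : List String) : List String :=
  if h : count < limit then
    if h2 : (temp.length : Int) < k then
      match PySem.List.pyGet? cs (i + count) with
      | some c => lcLoop cs k limit count (i + 1) (temp ++ [c]) concat
      | none => concat   -- IndexError in Python; excluded by Pre_
    else
      lcLoop cs k limit (count + 1) 0 [] (String.ofList temp :: concat)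
  else concat
termination_by ((limit - count).toNat, (k - (temp.length : Int)).toNat)
decreasing_by
  · apply Prod.Lex.right'
    · omega
    · simp only [List.length_append, List.length_cons, List.length_nil]
      omega
  · apply Prod.Lex.left
    omega

-- A after the loop: concat[0] (IndexError when empty, excluded by Pre_), then the rescan
-- 'for a in range(len(concat)): if len(concat[a]) > longest: …' — the index loop reading concat[a]
-- is ported as the fold over concat's elements (the same reads in the same order).
def lcScan (concat : List String) : String :=
  match PySem.List.pyGet? concat 0 with
  | none => ""   -- IndexError in Python; excluded by Pre_
  | some first =>
    concat.foldl
      (fun ls x => if PySem.Str.len first < PySem.Str.len x then x else ls) first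

-- concat.sort(key=len, reverse=True): CPython's stable reverse key-sort, ported by hand as the
-- stable mergeSort with 'a before b ↔ len(b) ≤ len(a)' (equal keys keep their original order,
-- longer strings come first — exactly Python's reverse=True rule).
def lcSort (concat : List String) : List String :=
  concat.mergeSort (fun a b => decide (PySem.Str.len b ≤ PySem.Str.len a))

def longest_concat (s : String) (k : Int) : String :=
  lcScan (lcSort
    (lcLoop s.toList k ((s.toList.length : Int) - (k - 1)) 0 0 [] []).reverse)

-- ===== PORT B =====
def longest_concat_alt (s : String) (k : Int) : String :=
  if k ≤ 0 then ""
  else String.ofList (PySem.List.slice s.toList none (some k))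

-- ===== PRECONDITION & SPEC =====
-- Pre_ excludes only the inputs on which A raises IndexError: 1 ≤ k with len(s) < k (no window exists).
def Pre_longest_concat (s : String) (k : Int) : Prop :=
  k ≤ 0 ∨ k ≤ (s.toList.length : Int)
instance (s : String) (k : Int) : Decidable (Pre_longest_concat s k) := by
  unfold Pre_longest_concat; infer_instance

def pvWitness_longest_concat : String × Int := ("abc", 2)

def Spec_longest_concat (s : String) (k : Int) (out : String) : Prop := out = longest_concat_alt s k
instance (s : String) (k : Int) (out : String) : Decidable (Spec_longest_concat s k out) := by unfold Spec_longest_concat; infer_instance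

-- ===== CLAIM (what is proved, stated in full; the proofs are below) =====
def Claim_equal_longest_concat : Prop := ∀ (s : String) (k : Int), Dom_longest_concat s k → Pre_longest_concat s k → Spec_longest_concat s k (longest_concat s k)

-- ===== LEMMAS AND PROOFS =====

theorem lcLoop_stop (cs : List Char) (k limit count i : Int) (temp : List Char)
    (concat : List String) (h : ¬ count < limit) :
    lcLoop cs k limit count i temp concat = concat := by
  rw [lcLoop]; simp [h]

-- k ≤ 0: each iteration flushes the empty temp
theorem lcLoop_nonpos (cs : List Char) (k limit : Int) (hk : k ≤ 0) :
    ∀ (m : Nat) (count : Int) (acc : List String), m = (limit - count).toNat →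
    lcLoop cs k limit count 0 [] acc = List.replicate (limit - count).toNat "" ++ acc := by
  intro m
  induction m with
  | zero =>
    intro count acc hm
    have h : ¬ count < limit := by omega
    rw [lcLoop_stop _ _ _ _ _ _ _ h]
    have : (limit - count).toNat = 0 := by omega
    simp [this]
  | succ n ih =>
    intro count acc hm
    by_cases h : count < limit
    · rw [lcLoop]
      have h2 : ¬ ((([] : List Char).length : Int) < k) := by simp; omega
      simp only [h, dif_pos, dif_neg h2]
      rw [ih (count + 1) (String.ofList [] :: acc) (by omega)]
      have hrep : (limit - count).toNat = (limit - (count + 1)).toNat + 1 := by omega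
      rw [hrep, List.replicate_succ']
      simp [List.append_assoc]
    · rw [lcLoop_stop _ _ _ _ _ _ _ h]
      have : (limit - count).toNat = 0 := by omega
      simp [this]

-- fill phase for k ≥ 1: from a partially filled temp to the flushed window
theorem lcLoop_fill (cs : List Char) (k limit : Int) (hk : 1 ≤ k)
    (hlim : limit = (cs.length : Int) - (k - 1)) :
    ∀ (n : Nat) (count : Int) (j : Nat) (acc : List String),
    0 ≤ count → count < limit → j + n = k.toNat →
    lcLoop cs k limit count (j : Int) ((cs.drop count.toNat).take j) acc
      = lcLoop cs k limit (count + 1) 0 [] (String.ofList ((cs.drop count.toNat).take k.toNat) :: acc) := by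
  intro n
  induction n with
  | zero =>
    intro count j acc hc0 hcl hjk
    have hbound : count.toNat + k.toNat ≤ cs.length := by omega
    have hlen : ((cs.drop count.toNat).take j).length = j := by
      simp [List.length_take, List.length_drop]; omega
    rw [lcLoop]
    have h2 : ¬ ((((cs.drop count.toNat).take j).length : Int) < k) := by
      rw [hlen]; omega
    simp only [hcl, dif_pos, dif_neg h2]
    have : j = k.toNat := by omega
    rw [this]
  | succ n ih =>
    intro count j acc hc0 hcl hjk
    have hbound : count.toNat + k.toNat ≤ cs.length := by omega
    have hjlt : j < k.toNat := by omega
    have hidx : count.toNat + j < cs.length := by omega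
    have hlen : ((cs.drop count.toNat).take j).length = j := by
      simp [List.length_take, List.length_drop]; omega
    rw [lcLoop]
    have h2 : (((cs.drop count.toNat).take j).length : Int) < k := by rw [hlen]; omega
    simp only [hcl, dif_pos, dif_pos h2]
    have hget : PySem.List.pyGet? cs ((j : Int) + count) = some cs[count.toNat + j] := by
      have : (j : Int) + count = ((count.toNat + j : Nat) : Int) := by push_cast; omega
      rw [this, PySem.List.pyGet?_natCast, List.getElem?_eq_getElem hidx]
    rw [hget]
    dsimp only
    have htake : (cs.drop count.toNat).take j ++ [cs[count.toNat + j]]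
        = (cs.drop count.toNat).take (j + 1) := by
      have hd : j < (cs.drop count.toNat).length := by simp [List.length_drop]; omega
      rw [List.take_add_one, List.getElem?_eq_getElem hd]
      simp [List.getElem_drop]
    have hcast : (j : Int) + 1 = ((j + 1 : Nat) : Int) := by push_cast; ring
    rw [htake, hcast]
    exact ih count (j + 1) acc hc0 hcl (by omega)

-- main characterisation for k ≥ 1: the loop appends all k-windows
theorem lcLoop_windows (cs : List Char) (k limit : Int) (hk : 1 ≤ k)
    (hlim : limit = (cs.length : Int) - (k - 1)) :
    ∀ (m : Nat) (count : Int) (acc : List String), 0 ≤ count → m = (limit - count).toNat →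
    lcLoop cs k limit count 0 [] acc
      = ((PySem.List.pyRange count limit 1).map
          (fun c => String.ofList ((cs.drop c.toNat).take k.toNat))).reverse ++ acc := by
  intro m
  induction m with
  | zero =>
    intro count acc hc0 hm
    have h : ¬ count < limit := by omega
    rw [lcLoop_stop _ _ _ _ _ _ _ h]
    rw [PySem.List.pyRange_one_eq_nil (by omega)]
    simp
  | succ n ih =>
    intro count acc hc0 hm
    by_cases h : count < limit
    · have hfill := lcLoop_fill cs k limit hk hlim k.toNat count 0 acc hc0 h (by omega)
      simp only [List.take_zero, Nat.cast_zero] at hfill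
      rw [hfill, ih (count + 1) _ (by omega) (by omega)]
      rw [PySem.List.pyRange_one_cons h]
      simp [List.append_assoc]
    · rw [lcLoop_stop _ _ _ _ _ _ _ h]
      rw [PySem.List.pyRange_one_eq_nil (by omega)]
      simp

-- a fold whose update never fires returns its initial value
theorem foldl_no_update {α β : Type} (l : List α) (f : β → α → β) (init : β)
    (h : ∀ b a, a ∈ l → f b a = b) : l.foldl f init = init := by
  induction l generalizing init with
  | nil => rfl
  | cons x xs ih =>
    simp only [List.foldl_cons]
    rw [h init x (by simp), ih _ (fun b a ha => h b a (by simp [ha]))]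

-- A's rescan keeps concat[0] when no element is strictly longer than it
theorem lcScan_cons (first : String) (rest : List String)
    (hall : ∀ x ∈ first :: rest, PySem.Str.len x ≤ PySem.Str.len first) :
    lcScan (first :: rest) = first := by
  unfold lcScan
  rw [PySem.List.pyGet?_zero_cons]
  apply foldl_no_update
  intro b a ha
  have hle := hall _ ha
  rw [if_neg (by omega)]

-- all keys equal ⇒ the stable reverse sort is the identity
theorem lcSort_const (l : List String) (L : Int)
    (h : ∀ x ∈ l, PySem.Str.len x = L) :
    lcSort l = l := by
  unfold lcSort
  apply List.mergeSort_of_pairwise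
  apply List.pairwise_of_forall_mem_list
  intro a ha b hb
  have ha2 := h a ha
  have hb2 := h b hb
  simp only [decide_eq_true_eq, PySem.Str.len_eq] at ha2 hb2 ⊢
  omega

-- every k-window has length k
theorem window_len (cs : List Char) (k : Int) (hk1 : 1 ≤ k)
    (c : Int) (hc0 : 0 ≤ c) (hcl : c < (cs.length : Int) - (k - 1)) :
    PySem.Str.len (String.ofList ((cs.drop c.toNat).take k.toNat)) = k := by
  rw [PySem.Str.len_eq]
  simp [List.length_take, List.length_drop]
  omega

theorem longest_concat_eq (s : String) (k : Int) (hpre : Pre_longest_concat s k) :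
    longest_concat s k = longest_concat_alt s k := by
  unfold longest_concat longest_concat_alt
  by_cases hk : k ≤ 0
  · -- k ≤ 0: the loop flushes empty windows; the result is ""
    have h0 : (0 : Int) ≤ (s.toList.length : Int) := Int.natCast_nonneg _
    have hlim1 : (1 : Int) ≤ (s.toList.length : Int) - (k - 1) := by omega
    rw [lcLoop_nonpos s.toList k _ hk (((s.toList.length : Int) - (k - 1)) - 0).toNat 0 [] rfl,
      List.append_nil, List.reverse_replicate]
    set N := (((s.toList.length : Int) - (k - 1)) - 0).toNat with hN
    have hNpos : 1 ≤ N := by rw [hN]; omega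
    clear_value N
    rw [lcSort_const _ 0 (by
      intro x hx
      rw [List.eq_of_mem_replicate hx, PySem.Str.len_eq]
      rfl)]
    have hrep : List.replicate N ("" : String) = "" :: List.replicate (N - 1) "" := by
      cases N with
      | zero => omega
      | succ n => simp [List.replicate_succ]
    rw [hrep, lcScan_cons _ _ (by
      intro x hx
      rw [← hrep] at hx
      rw [List.eq_of_mem_replicate hx])]
    rw [if_pos hk]
  · -- 1 ≤ k ≤ len(s): the loop produces all k-windows, each of length exactly k
    have hk1 : 1 ≤ k := by omega
    have hkl : k ≤ (s.toList.length : Int) := by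
      rcases hpre with h | h
      · omega
      · exact h
    set cs := s.toList with hcs
    set limit : Int := (cs.length : Int) - (k - 1) with hlimdef
    have hlim1 : 1 ≤ limit := by omega
    rw [lcLoop_windows cs k limit hk1 rfl (limit - 0).toNat 0 [] le_rfl rfl, List.append_nil,
      List.reverse_reverse]
    set W : Int → String := fun c => String.ofList ((cs.drop c.toNat).take k.toNat) with hW
    have hall : ∀ x ∈ (PySem.List.pyRange 0 limit 1).map W, PySem.Str.len x = k := by
      intro x hx
      rcases List.mem_map.mp hx with ⟨c, hc, rfl⟩
      rcases (PySem.List.mem_pyRange_one).mp hc with ⟨hc0, hcl⟩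
      exact window_len cs k hk1 c hc0 hcl
    rw [lcSort_const _ k hall]
    have hcons : (PySem.List.pyRange 0 limit 1).map W = W 0 :: (PySem.List.pyRange 1 limit 1).map W := by
      rw [PySem.List.pyRange_one_cons (by omega)]
      simp
    rw [hcons, lcScan_cons _ _ (by
      intro x hx
      rw [← hcons] at hx
      rw [hall x hx, hall (W 0) (by rw [hcons]; exact List.mem_cons_self ..)])]
    rw [if_neg hk, hW]
    simp only [Int.toNat_zero, List.drop_zero]
    have hsl := PySem.List.slice_to (xs := cs) (b := k) (by omega)
    rw [hsl]

-- ===== VERDICT (by name: the statement is the Claim_ definition above) =====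
theorem longest_concat_spec : Claim_equal_longest_concat := by
  intro s k _ hpre
  unfold Spec_longest_concat
  exact longest_concat_eq s k hpre
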